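-- pv_equiv track=rewrite | github.com/Wellheor1/tasks_from_interviews | traveler/traveler.py | count_depressions
-- ===== SOURCE A (Python) =====
-- def count_depressions(path: str) -> int:
--     count = 0
--     start = 0
--     for i in path:
--         if i == "u":
--             start += 1
--         else:
--             start -= 1
--         if start == 0 and i == "u":
--             count += 1
--     return count
-- ===== SOURCE B (Python) =====
-- def count_depressions(path: str) -> int:
--     # Segment decomposition: split the walk into completed zero-balance
--     # excursions (inner scan finds where the balance returns to 0) and
--     # count the excursions that begin with a downward step.
--     n = len(path)
--     count = 0
--     i = 0
--     while i < n:
--         first = path[i]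
--         bal = 0
--         j = i
--         while j < n:
--             bal += 1 if path[j] == 'u' else -1
--             j += 1
--             if bal == 0:
--                 break
--         if bal == 0 and first != 'u':
--             count += 1
--         i = j
--     return count
-- ===== Notes on version B (the rewrite author's own statement) =====
-- stated objective: alternative
-- what changed: Replaces the fused counter that checks the step character at each zero crossing with a segment decomposition: an inner scan splits the path into completed zero-balance excursions and an outer loop counts the excursions that begin with a downward step (correct because an excursion returning to level 0 via an up-step is exactly one that starts below sea level, i.e. with a non-'u' step).
import Mathlib
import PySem

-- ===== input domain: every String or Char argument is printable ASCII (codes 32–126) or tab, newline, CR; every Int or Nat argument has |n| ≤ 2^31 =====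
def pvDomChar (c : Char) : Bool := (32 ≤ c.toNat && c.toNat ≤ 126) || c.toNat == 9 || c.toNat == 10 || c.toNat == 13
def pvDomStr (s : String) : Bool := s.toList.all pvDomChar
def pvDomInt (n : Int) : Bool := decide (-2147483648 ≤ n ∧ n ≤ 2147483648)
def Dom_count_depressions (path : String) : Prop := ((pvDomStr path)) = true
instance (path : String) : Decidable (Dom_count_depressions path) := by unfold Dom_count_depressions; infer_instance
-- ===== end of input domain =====

-- B decomposes the walk into completed zero-balance excursions (inner scan) and counts
-- those beginning with a downward step, instead of A's fused per-step counter; same O(n).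

-- ===== PORT A =====
-- literal transliteration: one fused loop carrying (count, start)
def count_depressions (path : String) : Int :=
  (path.toList.foldl
    (fun (st : Int × Int) (i : Char) =>
      let start := if i = 'u' then st.2 + 1 else st.2 - 1
      let count := if start = 0 ∧ i = 'u' then st.1 + 1 else st.1
      (count, start))
    (0, 0)).1

-- ===== PORT B =====
-- inner while loop of Source B: consume steps until the balance returns to 0;
-- returns the remainder of the path, or none if the balance never returns to 0
def cdSegEnd : List Char → Int → Option (List Char)
  | [], _ => none
  | c :: cs, bal =>
    let b := bal + (if c = 'u' then (1 : Int) else -1)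
    if b = 0 then some cs else cdSegEnd cs b

-- the remainder after a completed excursion is strictly shorter (termination of the outer loop)
theorem cdSegEnd_length : ∀ (cs : List Char) (bal : Int) (rest : List Char),
    cdSegEnd cs bal = some rest → rest.length < cs.length := by
  intro cs
  induction cs with
  | nil => intro bal rest h; simp [cdSegEnd] at h
  | cons c cs ih =>
    intro bal rest h
    simp only [cdSegEnd] at h
    by_cases hb : bal + (if c = 'u' then (1 : Int) else -1) = 0
    · rw [if_pos hb] at h; cases h; simp
    · rw [if_neg hb] at h
      exact Nat.lt_trans (ih _ _ h) (by simp)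

-- outer while loop of Source B: one iteration per excursion
def cdGo : List Char → Int
  | [] => 0
  | c :: cs =>
    match h : cdSegEnd (c :: cs) 0 with
    | none => 0
    | some rest => (if c ≠ 'u' then 1 else 0) + cdGo rest
termination_by cs => cs.length
decreasing_by exact cdSegEnd_length _ _ _ h

def count_depressions_alt (path : String) : Int :=
  cdGo path.toList

-- ===== PRECONDITION & SPEC =====
def Spec_count_depressions (path : String) (out : Int) : Prop := out = count_depressions_alt path
instance (path : String) (out : Int) : Decidable (Spec_count_depressions path out) := by unfold Spec_count_depressions; infer_instance

-- ===== CLAIM (what is proved, stated in full; the proofs are below) =====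
def Claim_equal_count_depressions : Prop := ∀ (path : String), Dom_count_depressions path → Spec_count_depressions path (count_depressions path)

-- ===== LEMMAS AND PROOFS =====
-- A's loop body, as a named function
def cdStep (st : Int × Int) (i : Char) : Int × Int :=
  let start := if i = 'u' then st.2 + 1 else st.2 - 1
  let count := if start = 0 ∧ i = 'u' then st.1 + 1 else st.1
  (count, start)

-- while the balance is negative, A's loop counts exactly one at the close of the excursion
theorem cd_fold_neg : ∀ (cs : List Char) (count bal : Int), bal < 0 →
    (cs.foldl cdStep (count, bal)).1
      = match cdSegEnd cs bal with
        | none => count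
        | some rest => (rest.foldl cdStep (count + 1, 0)).1 := by
  intro cs
  induction cs with
  | nil => intro count bal _; simp [cdSegEnd]
  | cons c cs ih =>
    intro count bal hneg
    simp only [List.foldl_cons, cdSegEnd]
    by_cases hu : c = 'u'
    · subst hu
      by_cases h0 : bal + 1 = 0
      · simp [cdStep, h0]
      · have : bal + 1 < 0 := by omega
        simp [cdStep, h0]
        exact ih count (bal + 1) this
    · have h1 : ¬(bal - 1 = 0) := by omega
      have h2 : bal - 1 < 0 := by omega
      have e : bal + -1 = bal - 1 := by ring
      simp [cdStep, hu, e, h1]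
      exact ih count (bal - 1) h2

-- while the balance is positive, A's loop counts nothing up to the close of the excursion
theorem cd_fold_pos : ∀ (cs : List Char) (count bal : Int), 0 < bal →
    (cs.foldl cdStep (count, bal)).1
      = match cdSegEnd cs bal with
        | none => count
        | some rest => (rest.foldl cdStep (count, 0)).1 := by
  intro cs
  induction cs with
  | nil => intro count bal _; simp [cdSegEnd]
  | cons c cs ih =>
    intro count bal hpos
    simp only [List.foldl_cons, cdSegEnd]
    by_cases hu : c = 'u'
    · subst hu
      have h1 : ¬(bal + 1 = 0) := by omega
      have h2 : 0 < bal + 1 := by omega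
      simp [cdStep, h1]
      exact ih count (bal + 1) h2
    · have e : bal + -1 = bal - 1 := by ring
      by_cases h0 : bal - 1 = 0
      · simp [cdStep, e, h0, hu]
      · have h2 : 0 < bal - 1 := by omega
        simp [cdStep, hu, e, h0]
        exact ih count (bal - 1) h2

-- A's loop from sea level computes B's per-excursion sum
theorem cd_fold_zero : ∀ (n : ℕ) (cs : List Char), cs.length ≤ n → ∀ (count : Int),
    (cs.foldl cdStep (count, 0)).1 = count + cdGo cs := by
  intro n
  induction n with
  | zero =>
    intro cs hlen count
    have : cs = [] := List.length_eq_zero_iff.mp (Nat.le_zero.mp hlen)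
    subst this; simp [cdGo]
  | succ n ih =>
    intro cs hlen count
    cases cs with
    | nil => simp [cdGo]
    | cons c cs =>
      rw [cdGo.eq_def]
      simp only [List.foldl_cons]
      by_cases hu : c = 'u'
      · subst hu
        have hstep : cdStep (count, 0) 'u' = (count, 1) := by
          simp [cdStep]
        rw [hstep, cd_fold_pos cs count 1 (by omega)]
        have hseg : cdSegEnd ('u' :: cs) 0 = cdSegEnd cs 1 := by
          simp [cdSegEnd]
        rw [hseg]
        cases hse : cdSegEnd cs 1 with
        | none => simp
        | some rest =>
          have hr : rest.length ≤ n := by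
            have := cdSegEnd_length cs 1 rest hse
            simp only [List.length_cons] at hlen
            omega
          simp [ih rest hr count]
      · have hstep : cdStep (count, 0) c = (count, -1) := by
          simp [cdStep, hu]
        rw [hstep, cd_fold_neg cs count (-1) (by omega)]
        have hseg : cdSegEnd (c :: cs) 0 = cdSegEnd cs (-1) := by
          simp [cdSegEnd, hu]
        rw [hseg]
        cases hse : cdSegEnd cs (-1) with
        | none => simp
        | some rest =>
          have hr : rest.length ≤ n := by
            have := cdSegEnd_length cs (-1) rest hse
            simp only [List.length_cons] at hlen
            omega
          simp only [ih rest hr (count + 1), if_pos hu]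
          ring

-- ===== VERDICT (by name: the statement is the Claim_ definition above) =====
theorem count_depressions_spec : Claim_equal_count_depressions := by
  intro path _
  unfold Spec_count_depressions count_depressions count_depressions_alt
  have := cd_fold_zero path.toList.length path.toList le_rfl 0
  simpa [cdStep] using this
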